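-- pv_equiv track=rewrite | github.com/leilabbb/8thEGOMeeting-notebooks | functions/common.py | group_percents
-- ===== SOURCE A (Python) =====
-- def group_percents(summary_dict, lst):
--     percent_grps = [99, [95, 99], [75, 95], [50, 75], [25, 50], 25]
--     for grp in percent_grps:
--         if grp == 99:
--             x99 = []
--             ilst = []
--             for i, x in enumerate(lst):
--                 if type(x) is not str and x >= grp:
--                     x99.append(x)
--                 elif type(x) is not str and x < grp:
--                     ilst.append(i)
--             #x99 = len([x for x in lst if (type(x) is not str and x > grp)])
--             if len(x99) > 0:
--                 summary_dict['99'] = len(x99)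
--         elif grp == 25:
--             x0 = len([x for x in lst if x < grp])
--             if x0 > 0:
--                 summary_dict['0'] = x0
--         else:
--             xgrp = len([x for x in lst if grp[0] <= x < grp[1]])
--             if xgrp > 0:
--                 summary_dict[str(int(grp[0]))] = xgrp
--     return summary_dict, ilst
-- ===== SOURCE B (Python) =====
-- def group_percents(summary_dict, lst):
--     n99 = 0
--     ilst = []
--     for i, x in enumerate(lst):
--         if type(x) is not str:
--             if x >= 99:
--                 n99 += 1
--             else:
--                 ilst.append(i)
--     if n99 > 0:
--         summary_dict['99'] = n99
--     c95 = c75 = c50 = c25 = c0 = 0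
--     for x in lst:
--         if 95 <= x < 99:
--             c95 += 1
--         elif 75 <= x < 95:
--             c75 += 1
--         elif 50 <= x < 75:
--             c50 += 1
--         elif 25 <= x < 50:
--             c25 += 1
--         elif x < 25:
--             c0 += 1
--     for key, c in (('95', c95), ('75', c75), ('50', c50), ('25', c25), ('0', c0)):
--         if c > 0:
--             summary_dict[key] = c
--     return summary_dict, ilst
-- ===== Notes on version B (the rewrite author's own statement) =====
-- stated objective: alternative
-- what changed: A makes five separate filter-comprehension passes over lst (one per bucket below 99); B counts all five lower buckets in a single merged elif-chain pass with integer counters and writes the nonzero counters afterwards, keeping the 99/ilst enumerate pass as a counter instead of building the x99 list.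
import Mathlib
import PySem

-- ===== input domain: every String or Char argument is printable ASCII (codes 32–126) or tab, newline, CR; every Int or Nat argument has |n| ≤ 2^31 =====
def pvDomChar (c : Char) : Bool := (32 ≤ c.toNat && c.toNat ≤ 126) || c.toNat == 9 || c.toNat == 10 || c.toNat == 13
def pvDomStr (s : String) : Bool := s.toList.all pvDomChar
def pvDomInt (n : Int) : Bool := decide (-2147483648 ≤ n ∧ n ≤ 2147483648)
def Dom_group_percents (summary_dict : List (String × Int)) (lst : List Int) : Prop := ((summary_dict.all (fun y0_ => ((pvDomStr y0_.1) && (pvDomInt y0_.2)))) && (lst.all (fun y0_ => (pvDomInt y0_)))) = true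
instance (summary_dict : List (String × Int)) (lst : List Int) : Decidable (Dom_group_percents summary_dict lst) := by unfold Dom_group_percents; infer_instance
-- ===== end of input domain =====

-- B replaces A's five separate filter passes by one merged elif-chain counting pass; the dict
-- argument is mutated in place by both Pythons identically, the claim here is about the return value.
-- ===== PORT A =====
-- the inner 'for i, x in enumerate(lst)' loop of the grp == 99 branch (type(x) is not str is always true for Int)
def pvA99 (st : List Int × List Int) (ix : Int × Int) : List Int × List Int :=
  if ix.2 ≥ 99 then (st.1 ++ [ix.2], st.2)
  else (st.1, st.2 ++ [ix.1])

def group_percents (summary_dict : List (String × Int)) (lst : List Int) : (List (String × Int)) × List Int :=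
  let d := PySem.Dict.ofList summary_dict
  -- grp = 99
  let p := (PySem.List.enumerate lst 0).foldl pvA99 ([], [])
  let x99 := p.1
  let ilst := p.2
  let d := if x99.length > 0 then d.insert "99" (x99.length : Int) else d
  -- grp = [95, 99]
  let x95 := (lst.filter (fun x => decide (95 ≤ x ∧ x < 99))).length
  let d := if x95 > 0 then d.insert "95" (x95 : Int) else d
  -- grp = [75, 95]
  let x75 := (lst.filter (fun x => decide (75 ≤ x ∧ x < 95))).length
  let d := if x75 > 0 then d.insert "75" (x75 : Int) else d
  -- grp = [50, 75]
  let x50 := (lst.filter (fun x => decide (50 ≤ x ∧ x < 75))).length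
  let d := if x50 > 0 then d.insert "50" (x50 : Int) else d
  -- grp = [25, 50]
  let x25 := (lst.filter (fun x => decide (25 ≤ x ∧ x < 50))).length
  let d := if x25 > 0 then d.insert "25" (x25 : Int) else d
  -- grp = 25
  let x0 := (lst.filter (fun x => decide (x < 25))).length
  let d := if x0 > 0 then d.insert "0" (x0 : Int) else d
  (d.items, ilst)

-- ===== PORT B =====
-- the first B loop: counter for x ≥ 99 plus the index list
def pvB99 (st : Int × List Int) (ix : Int × Int) : Int × List Int :=
  if ix.2 ≥ 99 then (st.1 + 1, st.2)
  else (st.1, st.2 ++ [ix.1])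

-- the merged elif-chain pass (c95, c75, c50, c25, c0)
def pvBStep (c : Int × Int × Int × Int × Int) (x : Int) : Int × Int × Int × Int × Int :=
  if 95 ≤ x ∧ x < 99 then (c.1 + 1, c.2.1, c.2.2.1, c.2.2.2.1, c.2.2.2.2)
  else if 75 ≤ x ∧ x < 95 then (c.1, c.2.1 + 1, c.2.2.1, c.2.2.2.1, c.2.2.2.2)
  else if 50 ≤ x ∧ x < 75 then (c.1, c.2.1, c.2.2.1 + 1, c.2.2.2.1, c.2.2.2.2)
  else if 25 ≤ x ∧ x < 50 then (c.1, c.2.1, c.2.2.1, c.2.2.2.1 + 1, c.2.2.2.2)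
  else if x < 25 then (c.1, c.2.1, c.2.2.1, c.2.2.2.1, c.2.2.2.2 + 1)
  else c

def group_percents_alt (summary_dict : List (String × Int)) (lst : List Int) : (List (String × Int)) × List Int :=
  let q := (PySem.List.enumerate lst 0).foldl pvB99 (0, [])
  let n99 := q.1
  let ilst := q.2
  let d := PySem.Dict.ofList summary_dict
  let d := if n99 > 0 then d.insert "99" n99 else d
  let c := lst.foldl pvBStep (0, 0, 0, 0, 0)
  let d := if c.1 > 0 then d.insert "95" c.1 else d
  let d := if c.2.1 > 0 then d.insert "75" c.2.1 else d
  let d := if c.2.2.1 > 0 then d.insert "50" c.2.2.1 else d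
  let d := if c.2.2.2.1 > 0 then d.insert "25" c.2.2.2.1 else d
  let d := if c.2.2.2.2 > 0 then d.insert "0" c.2.2.2.2 else d
  (d.items, ilst)

-- ===== PRECONDITION & SPEC =====
def Spec_group_percents (summary_dict : List (String × Int)) (lst : List Int) (out : (List (String × Int)) × List Int) : Prop := out = group_percents_alt summary_dict lst
instance (summary_dict : List (String × Int)) (lst : List Int) (out : (List (String × Int)) × List Int) : Decidable (Spec_group_percents summary_dict lst out) := by unfold Spec_group_percents; infer_instance

-- ===== CLAIM (what is proved, stated in full; the proofs are below) =====
def Claim_equal_group_percents : Prop := ∀ (summary_dict : List (String × Int)) (lst : List Int), Dom_group_percents summary_dict lst → Spec_group_percents summary_dict lst (group_percents summary_dict lst)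

-- ===== LEMMAS AND PROOFS =====

-- ===== VERDICT (by name: the statement is the Claim_ definition above) =====
-- the two 99-loops agree: B's counter is the length of A's x99 list, and the ilst parts coincide
lemma pv99_agree : ∀ (l : List (Int × Int)) (a b : List Int) (n : Int), n = (a.length : Int) →
    (l.foldl pvB99 (n, b)).1 = (((l.foldl pvA99 (a, b)).1.length : Int)) ∧
    (l.foldl pvB99 (n, b)).2 = (l.foldl pvA99 (a, b)).2 := by
  intro l
  induction l with
  | nil => intro a b n h; simp [h]
  | cons p t ih =>
    intro a b n h
    simp only [List.foldl_cons, pvA99, pvB99]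
    by_cases hp : p.2 ≥ 99
    · simp only [if_pos hp]
      exact ih (a ++ [p.2]) b (n + 1) (by simp [h])
    · simp only [if_neg hp]
      exact ih a (b ++ [p.1]) n h

-- B's merged pass computes exactly A's five filter lengths
lemma pvB_counts : ∀ (l : List Int) (c : Int × Int × Int × Int × Int),
    l.foldl pvBStep c =
      (c.1 + ((l.filter (fun x => decide (95 ≤ x ∧ x < 99))).length : Int),
       c.2.1 + ((l.filter (fun x => decide (75 ≤ x ∧ x < 95))).length : Int),
       c.2.2.1 + ((l.filter (fun x => decide (50 ≤ x ∧ x < 75))).length : Int),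
       c.2.2.2.1 + ((l.filter (fun x => decide (25 ≤ x ∧ x < 50))).length : Int),
       c.2.2.2.2 + ((l.filter (fun x => decide (x < 25))).length : Int)) := by
  intro l
  induction l with
  | nil => intro c; simp
  | cons x t ih =>
    intro c
    simp only [List.foldl_cons, pvBStep]
    split_ifs with h1 h2 h3 h4 h5 <;>
      rw [ih] <;>
      simp only [List.filter_cons, decide_eq_true_eq, Prod.ext_iff] <;>
      [ simp only [if_pos h1, if_neg (show ¬(75 ≤ x ∧ x < 95) by omega),
          if_neg (show ¬(50 ≤ x ∧ x < 75) by omega), if_neg (show ¬(25 ≤ x ∧ x < 50) by omega),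
          if_neg (show ¬(x < 25) by omega)];
        simp only [if_neg h1, if_pos h2, if_neg (show ¬(50 ≤ x ∧ x < 75) by omega),
          if_neg (show ¬(25 ≤ x ∧ x < 50) by omega), if_neg (show ¬(x < 25) by omega)];
        simp only [if_neg h1, if_neg h2, if_pos h3, if_neg (show ¬(25 ≤ x ∧ x < 50) by omega),
          if_neg (show ¬(x < 25) by omega)];
        simp only [if_neg h1, if_neg h2, if_neg h3, if_pos h4, if_neg (show ¬(x < 25) by omega)];
        simp only [if_neg h1, if_neg h2, if_neg h3, if_neg h4, if_pos h5];
        simp only [if_neg h1, if_neg h2, if_neg h3, if_neg h4, if_neg h5] ] <;>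
      simp <;> omega

theorem group_percents_spec : Claim_equal_group_percents := by
  intro summary_dict lst _
  unfold Spec_group_percents group_percents group_percents_alt
  have h99 := pv99_agree (PySem.List.enumerate lst 0) [] [] 0 (by simp)
  have hc := pvB_counts lst (0, 0, 0, 0, 0)
  simp only [hc, h99.1, h99.2, Int.zero_add, Int.natCast_pos]
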